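-- pv_equiv track=rewrite | github.com/AryaSriva/CS115 | hw6.py | numToBinary
-- ===== SOURCE A (Python) =====
-- def numToBinary(n, k):
--     """returns the binary representation of a given value using k bits"""
--     if k == 0:
--         return ''
--     if n == 0:
--         return '0' + numToBinary(n, k-1)
--     elif n%2 != 0:
--         return numToBinary(n//2, k-1) + '1'
--     else:
--         return numToBinary(n//2, k-1) + '0'
-- ===== SOURCE B (Python) =====
-- def numToBinary(n, k):
--     """returns the binary representation of a given value using k bits"""
--     bits = []
--     for _ in range(k):
--         bits.append(str(n % 2))
--         n = n // 2
--     return ''.join(reversed(bits))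
-- ===== Notes on version B (the rewrite author's own statement) =====
-- stated objective: simpler
-- what changed: Replaces the three-way recursion (with its redundant n==0 special case) by a single iterative loop that collects least-significant bits and joins them reversed.
import Mathlib
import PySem

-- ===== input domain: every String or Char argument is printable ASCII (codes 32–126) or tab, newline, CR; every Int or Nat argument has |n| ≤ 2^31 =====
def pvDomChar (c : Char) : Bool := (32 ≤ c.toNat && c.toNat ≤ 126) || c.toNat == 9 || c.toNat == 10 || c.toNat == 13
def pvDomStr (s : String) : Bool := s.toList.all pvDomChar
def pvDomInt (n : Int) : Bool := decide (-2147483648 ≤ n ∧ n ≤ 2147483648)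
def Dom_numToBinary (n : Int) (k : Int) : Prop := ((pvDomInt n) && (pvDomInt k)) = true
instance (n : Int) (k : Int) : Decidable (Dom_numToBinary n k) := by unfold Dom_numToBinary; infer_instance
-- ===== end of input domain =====

-- B replaces A's three-way recursion by one iterative loop collecting LSB-first bits, joined reversed (objective: simpler).

-- ===== PORT A =====
-- A recurses on k; for k ≥ 0 the recursion depth is exactly k, so the Nat fuel k.toNat
-- makes the same sequence of calls (k < 0, where Python A diverges, is outside Pre_).
def numToBinaryAuxA (n : Int) : Nat → String
  | 0 => ""
  | m + 1 =>
    if n = 0 then "0" ++ numToBinaryAuxA n m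
    else if PySem.Int.mod n 2 ≠ 0 then numToBinaryAuxA (PySem.Int.floordiv n 2) m ++ "1"
    else numToBinaryAuxA (PySem.Int.floordiv n 2) m ++ "0"

def numToBinary (n : Int) (k : Int) : String := numToBinaryAuxA n k.toNat

-- ===== PORT B =====
def numToBinary_alt (n : Int) (k : Int) : String :=
  let st := (PySem.List.pyRange 0 k 1).foldl
    (fun (st : List String × Int) _ =>
      (st.1 ++ [PySem.Int.toStr (PySem.Int.mod st.2 2)], PySem.Int.floordiv st.2 2))
    ([], n)
  PySem.Str.join "" st.1.reverse

-- ===== PRECONDITION & SPEC =====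
-- Pre_ excludes k < 0, on which Python A recurses forever (RecursionError); A returns on all k ≥ 0.
def Pre_numToBinary (n : Int) (k : Int) : Prop := 0 ≤ k
instance (n : Int) (k : Int) : Decidable (Pre_numToBinary n k) := by unfold Pre_numToBinary; infer_instance
def pvWitness_numToBinary : Int × Int := (5, 3)

def Spec_numToBinary (n : Int) (k : Int) (out : String) : Prop := out = numToBinary_alt n k
instance (n : Int) (k : Int) (out : String) : Decidable (Spec_numToBinary n k out) := by unfold Spec_numToBinary; infer_instance

-- ===== CLAIM (what is proved, stated in full; the proofs are below) =====
def Claim_equal_numToBinary : Prop := ∀ (n : Int) (k : Int), Dom_numToBinary n k → Pre_numToBinary n k → Spec_numToBinary n k (numToBinary n k)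

-- ===== LEMMAS AND PROOFS =====

-- LSB-first list of the k bit-strings B's loop produces.
def lsbBits (n : Int) : Nat → List String
  | 0 => []
  | m + 1 => PySem.Int.toStr (PySem.Int.mod n 2) :: lsbBits (PySem.Int.floordiv n 2) m

-- the integer left in the loop state after m iterations
def iterDiv (n : Int) : Nat → Int
  | 0 => n
  | m + 1 => iterDiv (PySem.Int.floordiv n 2) m

theorem foldl_step_eq (l : List Int) (bits : List String) (n : Int) :
    l.foldl (fun (st : List String × Int) _ =>
        (st.1 ++ [PySem.Int.toStr (PySem.Int.mod st.2 2)], PySem.Int.floordiv st.2 2))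
      (bits, n)
    = (bits ++ lsbBits n l.length, iterDiv n l.length) := by
  induction l generalizing bits n with
  | nil => simp [lsbBits, iterDiv]
  | cons x xs ih =>
    simp only [List.foldl_cons, List.length_cons, ih, lsbBits, iterDiv,
      List.append_assoc, List.singleton_append]

theorem chars_join_nil_append (xs : List (List Char)) (y : List Char) :
    PySem.Chars.join [] (xs ++ [y]) = PySem.Chars.join [] xs ++ y := by
  induction xs with
  | nil => simp [PySem.Chars.join_nil, PySem.Chars.join_singleton]
  | cons a as ih =>
    cases as with
    | nil => simp [PySem.Chars.join_singleton, PySem.Chars.join_cons_cons]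
    | cons b bs =>
      simp only [List.cons_append] at ih ⊢
      rw [PySem.Chars.join_cons_cons, ih, PySem.Chars.join_cons_cons]
      simp [List.append_assoc]

theorem str_join_nil_append (l : List String) (s : String) :
    PySem.Str.join "" (l ++ [s]) = PySem.Str.join "" l ++ s := by
  apply String.toList_inj.mp
  rw [String.toList_append, PySem.Str.toList_join, PySem.Str.toList_join]
  simpa using chars_join_nil_append (l.map String.toList) s.toList

theorem auxA_zero_toList (m : Nat) : (numToBinaryAuxA 0 m).toList = List.replicate m '0' := by
  induction m with
  | zero => rfl
  | succ m ih =>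
    have h0 : ("0" : String).toList = ['0'] := by decide
    simp [numToBinaryAuxA, String.toList_append, ih, h0, List.replicate_succ]

theorem mod_two_cases (n : Int) : PySem.Int.mod n 2 = 0 ∨ PySem.Int.mod n 2 = 1 := by
  have h1 := PySem.Int.mod_nonneg n (b := 2) (by norm_num)
  have h2 := PySem.Int.mod_lt n (b := 2) (by norm_num)
  omega

theorem join_lsb_eq_auxA (m : Nat) (n : Int) :
    PySem.Str.join "" (lsbBits n m).reverse = numToBinaryAuxA n m := by
  induction m generalizing n with
  | zero => rfl
  | succ m ih =>
    rw [lsbBits, List.reverse_cons, str_join_nil_append, ih]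
    by_cases hn : n = 0
    · subst hn
      have hmod : PySem.Int.mod (0 : Int) 2 = 0 := by decide
      rw [numToBinaryAuxA, if_pos rfl, hmod]
      apply String.toList_inj.mp
      have hdiv : PySem.Int.floordiv (0 : Int) 2 = 0 := by decide
      have h0 : (PySem.Int.toStr 0).toList = ['0'] := by decide
      have h0' : ("0" : String).toList = ['0'] := by decide
      rw [hdiv, String.toList_append, String.toList_append, auxA_zero_toList, h0, h0', ← List.replicate_succ', List.singleton_append,
        ← List.replicate_succ]
    · rcases mod_two_cases n with h | h
      · rw [numToBinaryAuxA, if_neg hn, if_neg (fun hc => hc h), h]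
        have : PySem.Int.toStr 0 = "0" := by decide
        rw [this]
      · rw [numToBinaryAuxA, if_neg hn, if_pos (by rw [h]; exact one_ne_zero), h]
        have : PySem.Int.toStr 1 = "1" := by decide
        rw [this]

theorem alt_eq_auxA (n k : Int) : numToBinary_alt n k = numToBinaryAuxA n k.toNat := by
  unfold numToBinary_alt
  rw [foldl_step_eq]
  have hlen : (PySem.List.pyRange 0 k 1).length = k.toNat := by
    rw [PySem.List.length_pyRange_one]; omega
  rw [hlen]
  simp only [List.nil_append]
  exact join_lsb_eq_auxA _ _

-- ===== VERDICT (by name: the statement is the Claim_ definition above) =====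
theorem numToBinary_spec : Claim_equal_numToBinary := by
  intro n k _ _
  unfold Spec_numToBinary numToBinary
  rw [alt_eq_auxA]
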